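-- pv_equiv track=rewrite | github.com/dlesignac/cg | puzzle/mayan_calculation/python3/main.py | maybase
-- ===== SOURCE A (Python) =====
-- def maybase(x, alpha):
--     l = []
--
--     if x == 0:
--         l.append(alpha[0])
--
--     while x != 0:
--         a = x // 20
--         b = x %  20
--
--         l.append(alpha[b])
--         x = a
--
--     return "\n".join(l[::-1])
-- ===== SOURCE B (Python) =====
-- def maybase(x, alpha):
--     if x == 0:
--         return alpha[0]
--
--     def digits(n):
--         if n <= 0:
--             return []
--         return digits(n // 20) + [alpha[n % 20]]
--
--     return "\n".join(digits(x))
-- ===== Notes on version B (the rewrite author's own statement) =====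
-- stated objective: alternative
-- what changed: B emits the base-20 digits most-significant-first by recursion on x//20, so the build-LSB-first-then-reverse step of A disappears.
import Mathlib
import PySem

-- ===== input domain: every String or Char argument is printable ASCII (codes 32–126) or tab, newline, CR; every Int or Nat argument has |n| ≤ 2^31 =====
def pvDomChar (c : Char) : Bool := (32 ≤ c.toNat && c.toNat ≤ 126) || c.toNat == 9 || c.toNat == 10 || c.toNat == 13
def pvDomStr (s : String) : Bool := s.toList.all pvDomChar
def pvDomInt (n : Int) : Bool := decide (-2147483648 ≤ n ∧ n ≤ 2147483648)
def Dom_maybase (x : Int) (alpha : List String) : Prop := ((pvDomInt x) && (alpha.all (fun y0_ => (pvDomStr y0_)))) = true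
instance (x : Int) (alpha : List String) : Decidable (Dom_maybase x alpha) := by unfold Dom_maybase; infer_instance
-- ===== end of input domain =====

-- B replaces A's append-LSB-first-then-reverse loop by a most-significant-first recursion on x // 20, so no reversal is needed (alternative decomposition; return value only).

-- ===== PORT A =====
-- the `while x != 0` loop, appending alpha[x % 20] and setting x := x // 20;
-- guarded by 0 < x for totality (Python diverges on x < 0, excluded by Pre_);
-- pyGetD's default "" is unreachable under Pre_ (pyGet? none = IndexError, excluded by Pre_)
def maybaseLoop (x : Int) (alpha : List String) : List String :=
  if _h : 0 < x then
    PySem.List.pyGetD alpha (PySem.Int.mod x 20) "" :: maybaseLoop (PySem.Int.floordiv x 20) alpha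
  else []
termination_by x.toNat
decreasing_by
  rw [PySem.Int.floordiv_eq_ediv_of_pos (by norm_num : (0:Int) < 20)]
  omega

def maybase (x : Int) (alpha : List String) : String :=
  PySem.Str.join "\n"
    ((PySem.List.slice?
        ((if x = 0 then [PySem.List.pyGetD alpha 0 ""] else []) ++ maybaseLoop x alpha)
        none none (-1)).getD [])

-- ===== PORT B =====
-- digits(n): most-significant-first digit strings, by recursion on n // 20
def altDigits (n : Int) (alpha : List String) : List String :=
  if _h : n ≤ 0 then []
  else altDigits (PySem.Int.floordiv n 20) alpha ++ [PySem.List.pyGetD alpha (PySem.Int.mod n 20) ""]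
termination_by n.toNat
decreasing_by
  rw [PySem.Int.floordiv_eq_ediv_of_pos (by norm_num : (0:Int) < 20)]
  omega

def maybase_alt (x : Int) (alpha : List String) : String :=
  if x = 0 then PySem.List.pyGetD alpha 0 ""
  else PySem.Str.join "\n" (altDigits x alpha)

-- ===== PRECONDITION & SPEC =====
-- Pre_ excludes exactly the inputs where Python A does not return: x < 0 (the while
-- loop diverges, x // 20 never reaches 0), alpha = [] with x = 0 (IndexError on alpha[0]),
-- and any x whose base-20 digits reach past the end of alpha (IndexError on alpha[b]).
def Pre_maybase (x : Int) (alpha : List String) : Prop :=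
  0 ≤ x ∧ 0 < alpha.length ∧ ∀ d ∈ Nat.digits 20 x.toNat, d < alpha.length
instance (x : Int) (alpha : List String) : Decidable (Pre_maybase x alpha) := by unfold Pre_maybase; infer_instance

def pvWitness_maybase : Int × List String :=
  (42, ["a","b","c","d","e","f","g","h","i","j","k","l","m","n","o","p","q","r","s","t"])

def Spec_maybase (x : Int) (alpha : List String) (out : String) : Prop := out = maybase_alt x alpha
instance (x : Int) (alpha : List String) (out : String) : Decidable (Spec_maybase x alpha out) := by unfold Spec_maybase; infer_instance

-- ===== CLAIM (what is proved, stated in full; the proofs are below) =====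
def Claim_equal_maybase : Prop := ∀ (x : Int) (alpha : List String), Dom_maybase x alpha → Pre_maybase x alpha → Spec_maybase x alpha (maybase x alpha)

-- ===== LEMMAS AND PROOFS =====

-- B's MSB-first digit list is the reverse of A's LSB-first digit list
theorem altDigits_eq_reverse (n : Int) (alpha : List String) :
    altDigits n alpha = (maybaseLoop n alpha).reverse := by
  fun_induction altDigits n alpha with
  | case1 n h =>
      rw [maybaseLoop]
      simp [show ¬ 0 < n by omega]
  | case2 n h ih =>
      rw [maybaseLoop]
      simp [show 0 < n by omega]
      rw [PySem.Int.floordiv_eq_ediv_of_pos (by norm_num : (0:Int) < 20)] at ih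
      exact ih

-- ===== VERDICT (by name: the statement is the Claim_ definition above) =====
theorem maybase_spec : Claim_equal_maybase := by
  intro x alpha _ _
  unfold Spec_maybase maybase maybase_alt
  rw [PySem.List.slice?_none_none_neg_one]
  by_cases hx : x = 0
  · subst hx
    rw [maybaseLoop]
    simp [PySem.Str.join, PySem.Chars.join_singleton]
  · simp [hx, altDigits_eq_reverse]
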